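-- pv_equiv track=rewrite | github.com/Teakowa/Overwatch-AI-PVE | skills/ow-hero-sync-guard/scripts/player_constants_reachability.py | reachable_constants
-- ===== SOURCE A (Python) =====
-- from typing import Dict, List, Set
--
-- def reachable_constants(
--     defs: Set[str], deps: Dict[str, Set[str]], external_tokens: Set[str]
-- ) -> Set[str]:
--     roots = defs & external_tokens
--     keep: Set[str] = set()
--     stack = list(roots)
--
--     while stack:
--         cur = stack.pop()
--         if cur in keep:
--             continue
--         keep.add(cur)
--         stack.extend(deps.get(cur, set()) - keep)
--
--     return keep
-- ===== SOURCE B (Python) =====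
-- def reachable_constants(defs, deps, external_tokens):
--     # Recursive DFS: the call stack replaces A's explicit worklist.
--     keep = set()
--
--     def visit(node):
--         if node not in keep:
--             keep.add(node)
--             for child in deps.get(node, set()):
--                 visit(child)
--
--     for root in defs:
--         if root in external_tokens:
--             visit(root)
--     return keep
-- ===== Notes on version B (the rewrite author's own statement) =====
-- stated objective: idiomatic
-- what changed: replaces A's explicit worklist stack (pop/extend with a push-time set subtraction) by a recursive visit helper that adds the node and recurses over each dependency, accumulating into a shared keep set
import Mathlib
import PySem

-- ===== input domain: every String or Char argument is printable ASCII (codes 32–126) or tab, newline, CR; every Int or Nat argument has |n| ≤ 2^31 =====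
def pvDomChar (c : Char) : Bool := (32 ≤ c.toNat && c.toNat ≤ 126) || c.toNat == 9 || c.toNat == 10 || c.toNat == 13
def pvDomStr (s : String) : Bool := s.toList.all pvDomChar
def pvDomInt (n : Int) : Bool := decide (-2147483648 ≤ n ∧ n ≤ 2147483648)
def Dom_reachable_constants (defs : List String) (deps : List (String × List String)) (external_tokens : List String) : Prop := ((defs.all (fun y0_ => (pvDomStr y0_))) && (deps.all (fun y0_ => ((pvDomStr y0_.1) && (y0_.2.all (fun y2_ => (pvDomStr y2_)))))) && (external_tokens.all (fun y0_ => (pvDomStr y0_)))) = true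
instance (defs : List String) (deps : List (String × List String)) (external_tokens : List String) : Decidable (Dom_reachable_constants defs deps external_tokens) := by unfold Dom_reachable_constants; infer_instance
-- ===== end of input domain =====

-- B replaces A's explicit worklist stack by a recursive depth-first visit helper (same reachability
-- computation, a different decomposition); the function returns a set, so discovery order is immaterial.
-- Both ports: Python's set-iteration order is unspecified, so each port fixes a concrete iteration
-- order over set representations; both recursions carry a fuel argument that only makes the graph
-- traversal total (the proofs show it is always sufficient).

-- ===== PORT A =====
-- all strings that can ever enter `keep`: the defs plus every dependency value
def pvUniv (defs : List String) (deps : List (String × List String)) : List String :=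
  defs ++ (deps.map Prod.snd).flatten

-- the while loop: `stack` is stored top-first (Python pops/extends at the list end;
-- this port pops at the head of the reversed storage, which is the same stack discipline)
def reachA_loop (deps : List (String × List String)) :
    Nat → PySem.Set String → List String → PySem.Set String
  | 0, keep, _ => keep
  | _ + 1, keep, [] => keep
  | fuel + 1, keep, cur :: rest =>
    if PySem.Set.contains keep cur then
      reachA_loop deps fuel keep rest
    else
      let keep' := PySem.Set.add keep cur
      reachA_loop deps fuel keep'
        ((((PySem.Dict.mk deps).getD cur []).filter (fun d => !PySem.Set.contains keep' d)) ++ rest)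

def reachable_constants (defs : List String) (deps : List (String × List String)) (external_tokens : List String) : List String :=
  let roots := PySem.Set.inter (PySem.Set.ofList defs) external_tokens
  reachA_loop deps
    (((pvUniv defs deps).length + 1) * ((pvUniv defs deps).length + 2) + roots.length)
    PySem.Set.empty roots

-- ===== PORT B =====
-- `deps.get(node, set())` as a first-match scan of the association list (exact: dict lookup is first match)
def pvDepsOf (graph : List (String × List String)) (node : String) : List String :=
  match graph.find? (fun e => e.1 == node) with
  | some e => e.2
  | none => []

-- recursion budget for `visit`: more than the number of distinct nodes that can ever be added
def pvFuelB (defs : List String) (deps : List (String × List String)) : Nat :=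
  defs.length + (deps.map (fun e => e.2.length)).sum + 1

-- recursive `visit` (mutual with the `for child in ...` loop, transcribed as structural recursion):
-- if the node is new, add it and visit each of its dependencies in turn
mutual
def visitB (graph : List (String × List String)) : Nat → PySem.Set String → String → PySem.Set String
  | 0, seen, _ => seen
  | gas + 1, seen, node =>
    if node ∉ seen then visitKids graph gas (PySem.Set.add seen node) (pvDepsOf graph node)
    else seen
  termination_by gas _ _ => (gas, 0)
def visitKids (graph : List (String × List String)) : Nat → PySem.Set String → List String → PySem.Set String
  | _, seen, [] => seen
  | gas, seen, child :: more => visitKids graph gas (visitB graph gas seen child) more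
  termination_by gas _ kids => (gas, kids.length + 1)
end

def reachable_constants_alt (defs : List String) (deps : List (String × List String)) (external_tokens : List String) : List String :=
  (PySem.Set.ofList defs).foldl
    (fun acc root => if root ∈ external_tokens then visitB deps (pvFuelB defs deps) acc root else acc)
    PySem.Set.empty

-- ===== PRECONDITION & SPEC =====
def Spec_reachable_constants (defs : List String) (deps : List (String × List String)) (external_tokens : List String) (out : List String) : Prop := out = reachable_constants_alt defs deps external_tokens
instance (defs : List String) (deps : List (String × List String)) (external_tokens : List String) (out : List String) : Decidable (Spec_reachable_constants defs deps external_tokens out) := by unfold Spec_reachable_constants; infer_instance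

-- ===== CLAIM (what is proved, stated in full; the proofs are below) =====
def Claim_equal_reachable_constants : Prop := ∀ (defs : List String) (deps : List (String × List String)) (external_tokens : List String), Dom_reachable_constants defs deps external_tokens → Spec_reachable_constants defs deps external_tokens (reachable_constants defs deps external_tokens)

-- ===== LEMMAS AND PROOFS =====

-- B's lookup is A's dictionary lookup with default
theorem pvDepsOf_eq (deps : List (String × List String)) (node : String) :
    pvDepsOf deps node = (PySem.Dict.mk deps).getD node [] := by
  induction deps with
  | nil => simp [pvDepsOf, PySem.Dict.getD_eq_get?_getD, PySem.Dict.get?]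
  | cons p rest ih =>
    rw [PySem.Dict.getD_eq_get?_getD, PySem.Dict.get?_mk_cons]
    by_cases hb : (p.1 == node) = true
    · simp [pvDepsOf, List.find?, hb]
    · simp only [Bool.not_eq_true] at hb
      simp only [pvDepsOf, List.find?, hb, if_false, Bool.false_eq_true] at ih ⊢
      rw [ih, PySem.Dict.getD_eq_get?_getD]

-- B's fuel is one more than the size of the universe
theorem pvFuelB_eq (defs : List String) (deps : List (String × List String)) :
    pvFuelB defs deps = (pvUniv defs deps).length + 1 := by
  simp [pvFuelB, pvUniv, List.length_flatten, Function.comp_def]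

-- the child loop is a left fold of visits
theorem visitKids_eq (deps : List (String × List String)) (g : Nat) (l : List String)
    (s : PySem.Set String) : visitKids deps g s l = l.foldl (visitB deps g) s := by
  induction l generalizing s with
  | nil => simp [visitKids]
  | cons c rest ih => rw [visitKids, List.foldl_cons, ih]

-- one-step unfolding of `visit` with the loop rewritten as a fold
theorem visitB_succ (deps : List (String × List String)) (g : Nat) (keep : PySem.Set String)
    (node : String) : visitB deps (g + 1) keep node
      = if node ∉ keep then (pvDepsOf deps node).foldl (visitB deps g) (PySem.Set.add keep node)
        else keep := by
  rw [visitB, visitKids_eq]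

-- number of universe elements not yet kept (termination potential)
def pvMiss (U keep : List String) : Nat :=
  (U.filter (fun x => !PySem.Set.contains keep x)).length

theorem pvMiss_le_length (U keep : List String) : pvMiss U keep ≤ U.length := by
  exact List.length_filter_le _ _

theorem pvMiss_anti (U k k' : List String) (h : ∀ x, x ∈ k → x ∈ k') :
    pvMiss U k' ≤ pvMiss U k := by
  induction U with
  | nil => simp [pvMiss]
  | cons a U ih =>
    simp only [pvMiss] at ih ⊢
    by_cases h1 : a ∈ k'
    · by_cases h2 : a ∈ k
      · simp [h1, h2] at ih ⊢; omega
      · simp [h1, h2] at ih ⊢; omega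
    · have h2 : a ∉ k := fun hm => h1 (h a hm)
      simp [h1, h2] at ih ⊢; omega

theorem pvMiss_lt_add (U keep : List String) (cur : String)
    (hU : cur ∈ U) (hk : cur ∉ keep) :
    pvMiss U (PySem.Set.add keep cur) < pvMiss U keep := by
  induction U with
  | nil => simp at hU
  | cons a U ih =>
    have hsub : ∀ x, x ∈ keep → x ∈ PySem.Set.add keep cur := by
      intro x hx; simp [PySem.Set.mem_add, hx]
    simp only [pvMiss] at ih ⊢
    by_cases hac : a = cur
    · subst hac
      have hmono := pvMiss_anti U keep (PySem.Set.add keep a) hsub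
      simp only [pvMiss] at hmono
      simp [hk] at hmono ⊢
      omega
    · have hU' : cur ∈ U := by
        rcases List.mem_cons.mp hU with h | h
        · exact absurd h.symm hac
        · exact h
      have hlt := ih hU'
      by_cases ha2 : a ∈ keep
      · simp [ha2, hac] at hlt ⊢; omega
      · simp [ha2, hac] at hlt ⊢; omega

-- dependency values live inside the universe
theorem pv_get?_mem_snd (deps : List (String × List String)) (cur : String) (v : List String)
    (h : (PySem.Dict.mk deps).get? cur = some v) : v ∈ deps.map Prod.snd := by
  induction deps with
  | nil => simp [PySem.Dict.get?] at h
  | cons p rest ih =>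
    rw [PySem.Dict.get?_mk_cons] at h
    by_cases hb : p.1 == cur
    · simp [hb] at h; simp [← h]
    · simp [hb] at h
      exact List.mem_cons_of_mem _ (ih h)

theorem pv_children_sub (defs : List String) (deps : List (String × List String)) (cur x : String)
    (h : x ∈ (PySem.Dict.mk deps).getD cur []) : x ∈ pvUniv defs deps := by
  rw [PySem.Dict.getD_eq_get?_getD] at h
  cases hg : (PySem.Dict.mk deps).get? cur with
  | none => rw [hg] at h; simp at h
  | some v =>
    rw [hg] at h
    simp only [Option.getD_some] at h
    have := pv_get?_mem_snd deps cur v hg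
    exact List.mem_append.mpr (Or.inr (List.mem_flatten.mpr ⟨v, this, h⟩))

theorem pv_children_len (defs : List String) (deps : List (String × List String)) (cur : String) :
    ((PySem.Dict.mk deps).getD cur []).length ≤ (pvUniv defs deps).length := by
  rw [PySem.Dict.getD_eq_get?_getD]
  cases hg : (PySem.Dict.mk deps).get? cur with
  | none => simp
  | some v =>
    have hv := pv_get?_mem_snd deps cur v hg
    have h1 : v.length ≤ ((deps.map Prod.snd).map List.length).sum :=
      List.single_le_sum (by intro x _; exact Nat.zero_le x) _ (List.mem_map_of_mem hv)
    simp only [Option.getD_some, pvUniv, List.length_append, List.length_flatten]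
    omega

-- generic: a fold by a pointwise-membership-preserving function preserves membership
theorem pv_foldl_mem_mono {f : PySem.Set String → String → PySem.Set String}
    (hf : ∀ s a x, x ∈ s → x ∈ f s a) :
    ∀ (l : List String) (s : PySem.Set String) (x : String), x ∈ s → x ∈ l.foldl f s := by
  intro l
  induction l with
  | nil => intro s x hx; simpa using hx
  | cons a l ih => intro s x hx; exact ih _ _ (hf s a x hx)

theorem pv_visit_mono (deps : List (String × List String)) :
    ∀ (g : Nat) (keep : PySem.Set String) (node x : String),
      x ∈ keep → x ∈ visitB deps g keep node := by
  intro g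
  induction g with
  | zero => intro keep node x hx; simpa [visitB] using hx
  | succ g ih =>
    intro keep node x hx
    rw [visitB_succ]
    split
    · exact pv_foldl_mem_mono (fun s a y hy => ih s a y hy) _ _ _
        ((PySem.Set.mem_add _ _ _).mpr (Or.inl hx))
    · exact hx

-- visiting an already-kept node is a no-op at any fuel
theorem pv_visit_skip (deps : List (String × List String)) (h : Nat)
    (s : PySem.Set String) (c : String) (hc : c ∈ s) : visitB deps h s c = s := by
  cases h with
  | zero => simp [visitB]
  | succ h => simp [visitB_succ, hc]

-- pushing only the not-yet-kept dependencies is equivalent to visiting them all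
theorem pv_foldl_filter_absorb (deps : List (String × List String)) (h : Nat) (k0 : List String) :
    ∀ (l : List String) (s : PySem.Set String), (∀ x, x ∈ k0 → x ∈ s) →
      (l.filter (fun d => !PySem.Set.contains k0 d)).foldl (visitB deps h) s
        = l.foldl (visitB deps h) s := by
  intro l
  induction l with
  | nil => intro s _; rfl
  | cons c l ih =>
    intro s hs
    by_cases hc : PySem.Set.contains k0 c = true
    · have : visitB deps h s c = s :=
        pv_visit_skip deps h s c (hs c ((PySem.Set.contains_iff _ _).mp hc))
      simp only [List.filter_cons, hc, Bool.not_true, List.foldl_cons, this]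
      exact ih s hs
    · have hc' : PySem.Set.contains k0 c = false := by
        rcases Bool.eq_false_or_eq_true (PySem.Set.contains k0 c) with h2 | h2
        · exact absurd h2 hc
        · exact h2
      simp only [List.filter_cons, hc', Bool.not_false, List.foldl_cons]
      exact ih _ (fun x hx => pv_visit_mono deps h s c x (hs x hx))

-- fuel stability: one more unit of fuel changes nothing once fuel exceeds the missing count
theorem pv_visit_stable (defs : List String) (deps : List (String × List String)) :
    ∀ (g : Nat) (keep : PySem.Set String) (node : String),
      node ∈ pvUniv defs deps → pvMiss (pvUniv defs deps) keep < g →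
      visitB deps g keep node = visitB deps (g + 1) keep node := by
  intro g
  induction g using Nat.strong_induction_on with
  | _ g IH =>
    intro keep node hnode hfuel
    cases g with
    | zero => omega
    | succ g =>
      rw [visitB_succ, visitB_succ]
      split
      · rename_i hnk
        have hmlt := pvMiss_lt_add (pvUniv defs deps) keep node hnode hnk
        -- inner list induction over dependencies
        have claim : ∀ (l : List String), (∀ c, c ∈ l → c ∈ pvUniv defs deps) →
            ∀ (s : PySem.Set String), pvMiss (pvUniv defs deps) s < g →
            l.foldl (visitB deps g) s = l.foldl (visitB deps (g + 1)) s := by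
          intro l
          induction l with
          | nil => intro _ s _; rfl
          | cons c l ihl =>
            intro hl s hs
            have hc := hl c (List.mem_cons_self)
            have h1 : visitB deps g s c = visitB deps (g + 1) s c :=
              IH g (Nat.lt_succ_self g) s c hc hs
            simp only [List.foldl_cons, h1]
            have hsub : ∀ x, x ∈ s → x ∈ visitB deps (g + 1) s c :=
              fun x hx => pv_visit_mono deps (g + 1) s c x hx
            exact ihl (fun d hd => hl d (List.mem_cons_of_mem _ hd)) _
              (Nat.lt_of_le_of_lt (pvMiss_anti _ _ _ hsub) hs)
        exact claim _ (fun c hc => pv_children_sub defs deps node c (by rwa [pvDepsOf_eq] at hc)) _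
          (by omega)
      · rfl

theorem pv_visit_fuel_le (defs : List String) (deps : List (String × List String))
    (g g' : Nat) (keep : PySem.Set String) (node : String)
    (hnode : node ∈ pvUniv defs deps) (hfuel : pvMiss (pvUniv defs deps) keep < g)
    (hle : g ≤ g') : visitB deps g keep node = visitB deps g' keep node := by
  induction g' with
  | zero => omega
  | succ g' ih =>
    rcases Nat.lt_or_ge g (g' + 1) with h | h
    · have h1 := ih (by omega)
      have h2 := pv_visit_stable defs deps g' keep node hnode (by omega)
      rw [h1, h2]
    · have : g = g' + 1 := by omega
      rw [this]

theorem pv_foldl_fuel_congr (defs : List String) (deps : List (String × List String))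
    (g g' : Nat) (hle : g ≤ g') :
    ∀ (l : List String), (∀ c, c ∈ l → c ∈ pvUniv defs deps) →
      ∀ (s : PySem.Set String), pvMiss (pvUniv defs deps) s < g →
      l.foldl (visitB deps g) s = l.foldl (visitB deps g') s := by
  intro l
  induction l with
  | nil => intro _ s _; rfl
  | cons c l ih =>
    intro hl s hs
    have hc := hl c (List.mem_cons_self)
    have h1 := pv_visit_fuel_le defs deps g g' s c hc hs hle
    simp only [List.foldl_cons, h1]
    exact ih (fun d hd => hl d (List.mem_cons_of_mem _ hd)) _
      (Nat.lt_of_le_of_lt (pvMiss_anti _ _ _ (fun x hx => pv_visit_mono deps g' s c x hx)) hs)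

-- the bridge: A's worklist loop equals B's fold of recursive visits
theorem pv_bridge (defs : List String) (deps : List (String × List String)) :
    ∀ (f : Nat) (keep : PySem.Set String) (stack : List String) (g : Nat),
      (∀ x, x ∈ stack → x ∈ pvUniv defs deps) →
      pvMiss (pvUniv defs deps) keep * ((pvUniv defs deps).length + 1) + stack.length < f →
      pvMiss (pvUniv defs deps) keep < g →
      reachA_loop deps f keep stack = stack.foldl (visitB deps g) keep := by
  intro f
  induction f with
  | zero => intro keep stack g _ hf _; omega
  | succ f ih =>
    intro keep stack g hstack hf hg
    cases stack with
    | nil => rfl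
    | cons cur rest =>
      simp only [reachA_loop, List.foldl_cons]
      by_cases hc : PySem.Set.contains keep cur = true
      · have hskip : visitB deps g keep cur = keep :=
          pv_visit_skip deps g keep cur ((PySem.Set.contains_iff _ _).mp hc)
        rw [hc]
        simp only [if_true, hskip]
        exact ih keep rest g (fun x hx => hstack x (List.mem_cons_of_mem _ hx))
          (by simp at hf ⊢; omega) hg
      · have hc' : PySem.Set.contains keep cur = false := by
          rcases Bool.eq_false_or_eq_true (PySem.Set.contains keep cur) with h2 | h2
          · exact absurd h2 hc
          · exact h2
        rw [hc']
        simp only [if_false, Bool.false_eq_true]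
        have hcur : cur ∈ pvUniv defs deps := hstack cur List.mem_cons_self
        have hnk : cur ∉ keep := fun h => hc ((PySem.Set.contains_iff _ _).mpr h)
        have hmlt := pvMiss_lt_add (pvUniv defs deps) keep cur hcur hnk
        set keep' := PySem.Set.add keep cur with hkeep'
        set children := (PySem.Dict.mk deps).getD cur [] with hch
        have hchlen : children.length ≤ (pvUniv defs deps).length := pv_children_len defs deps cur
        have hchsub : ∀ c, c ∈ children → c ∈ pvUniv defs deps :=
          fun c hcm => pv_children_sub defs deps cur c hcm
        -- apply the outer IH to the new stack
        have hstep := ih keep' ((children.filter (fun d => !PySem.Set.contains keep' d)) ++ rest) g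
          (by
            intro x hx
            rcases List.mem_append.mp hx with h | h
            · exact hchsub x (List.mem_of_mem_filter h)
            · exact hstack x (List.mem_cons_of_mem _ h))
          (by
            have hflt : (children.filter (fun d => !PySem.Set.contains keep' d)).length ≤ children.length :=
              List.length_filter_le _ _
            simp only [List.length_append, List.length_cons] at hf ⊢
            have h1 : pvMiss (pvUniv defs deps) keep' + 1 ≤ pvMiss (pvUniv defs deps) keep := hmlt
            nlinarith [Nat.le_of_lt_succ hf])
          (by omega)
        rw [hstep, List.foldl_append]
        -- rewrite B's head visit
        have hg1 : ∃ g', g = g' + 1 := ⟨g - 1, by omega⟩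
        obtain ⟨g', rfl⟩ := hg1
        have hvis : visitB deps (g' + 1) keep cur
            = children.foldl (visitB deps g') keep' := by
          rw [visitB_succ, if_pos hnk, pvDepsOf_eq]
        rw [hvis]
        congr 1
        rw [pv_foldl_filter_absorb deps (g' + 1) keep' children keep' (fun x hx => hx)]
        exact (pv_foldl_fuel_congr defs deps g' (g' + 1) (Nat.le_succ _) children hchsub keep'
          (by omega)).symm

-- ===== VERDICT (by name: the statement is the Claim_ definition above) =====
theorem reachable_constants_spec : Claim_equal_reachable_constants := by
  intro defs deps external_tokens _
  unfold Spec_reachable_constants reachable_constants reachable_constants_alt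
  rw [PySem.List.foldl_ite_eq_foldl_filter]
  have hfilt : (PySem.Set.ofList defs).filter (fun r => decide (r ∈ external_tokens))
      = PySem.Set.inter (PySem.Set.ofList defs) external_tokens := by
    have h1 : (PySem.Set.ofList defs).filter (fun r => decide (r ∈ external_tokens))
        = (PySem.Set.ofList defs).filter (fun r => PySem.Set.contains external_tokens r) := by
      apply List.filter_congr
      intro x _
      by_cases h : x ∈ external_tokens
      · simp [h]
      · simp [h]
    exact h1
  rw [hfilt, pvFuelB_eq]
  apply pv_bridge defs deps _ PySem.Set.empty _ ((pvUniv defs deps).length + 1)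
  · intro x hx
    have h1 : x ∈ PySem.Set.ofList defs := ((PySem.Set.mem_inter _ _ _).mp hx).1
    have h2 : x ∈ defs := (PySem.Set.mem_ofList _ _).mp h1
    exact List.mem_append.mpr (Or.inl h2)
  · have hm : pvMiss (pvUniv defs deps) PySem.Set.empty ≤ (pvUniv defs deps).length :=
      pvMiss_le_length _ _
    have h1 : pvMiss (pvUniv defs deps) PySem.Set.empty * ((pvUniv defs deps).length + 1)
        ≤ (pvUniv defs deps).length * ((pvUniv defs deps).length + 1) :=
      Nat.mul_le_mul_right _ hm
    have h2 : (pvUniv defs deps).length * ((pvUniv defs deps).length + 1)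
        < ((pvUniv defs deps).length + 1) * ((pvUniv defs deps).length + 2) := by nlinarith
    omega
  · have hm : pvMiss (pvUniv defs deps) PySem.Set.empty ≤ (pvUniv defs deps).length :=
      pvMiss_le_length _ _
    omega
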